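-- pv_equiv track=rewrite | github.com/jamesrahenry/Rosetta_Analysis | viz/viz_procrustes_rotation.py | _largest_per_family
-- ===== SOURCE A (Python) =====
-- FAMILY_COLORS = {               # lowercase keys — matched by _family()
--     "pythia":  "#1565C0",       # spec: Pythia blue
--     "gpt2":    "#558B2F",       # spec: GPT-2 green
--     "opt":     "#6A1B9A",       # spec: OPT purple
--     "qwen":    "#E65100",       # spec: Qwen orange
--     "gemma":   "#00695C",       # spec: Gemma teal
--     "mistral": "#546E7A",       # spec: Other blue-grey
--     "phi":     "#4E342E",       # spec: Phi brown
-- }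
--
-- def _family(mid: str) -> str:
--     for fam in FAMILY_COLORS:
--         if fam in mid.lower():
--             return fam
--     return "other"
--
-- def _largest_per_family(models):
--     """Filter to largest model per family (by hidden_dim, then layer count)."""
--     best = {}
--     for mid, mdata in models.items():
--         fam = _family(mid)
--         dim = mdata.get("hidden_dim", 0)
--         n = mdata.get("n_layers", 0)
--         score = (dim, n)
--         if fam not in best or score > best[fam][1]:
--             best[fam] = (mid, score)
--     keep = {v[0] for v in best.values()}
--     return {mid: mdata for mid, mdata in models.items() if mid in keep}
-- ===== SOURCE B (Python) =====
-- FAMILY_COLORS = {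
--     "pythia":  "#1565C0",
--     "gpt2":    "#558B2F",
--     "opt":     "#6A1B9A",
--     "qwen":    "#E65100",
--     "gemma":   "#00695C",
--     "mistral": "#546E7A",
--     "phi":     "#4E342E",
-- }
--
-- def _family(mid: str) -> str:
--     for fam in FAMILY_COLORS:
--         if fam in mid.lower():
--             return fam
--     return "other"
--
-- def _size(kv):
--     mdata = kv[1]
--     return (mdata.get("hidden_dim", 0), mdata.get("n_layers", 0))
--
-- def _largest_per_family(models):
--     """Filter to largest model per family (by hidden_dim, then layer count)."""
--     groups = {}
--     for mid, mdata in models.items():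
--         groups.setdefault(_family(mid), []).append((mid, mdata))
--     keep = {max(lst, key=_size)[0] for lst in groups.values()}
--     return {mid: mdata for mid, mdata in models.items() if mid in keep}
-- ===== Notes on version B (the rewrite author's own statement) =====
-- stated objective: alternative
-- what changed: Instead of one pass keeping an incremental running-best dict keyed by family, B first groups all models by family via setdefault-append and then picks each group's winner with Python's max (first maximal element, matching A's strict-> first-wins tie rule) before filtering.
import Mathlib
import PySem

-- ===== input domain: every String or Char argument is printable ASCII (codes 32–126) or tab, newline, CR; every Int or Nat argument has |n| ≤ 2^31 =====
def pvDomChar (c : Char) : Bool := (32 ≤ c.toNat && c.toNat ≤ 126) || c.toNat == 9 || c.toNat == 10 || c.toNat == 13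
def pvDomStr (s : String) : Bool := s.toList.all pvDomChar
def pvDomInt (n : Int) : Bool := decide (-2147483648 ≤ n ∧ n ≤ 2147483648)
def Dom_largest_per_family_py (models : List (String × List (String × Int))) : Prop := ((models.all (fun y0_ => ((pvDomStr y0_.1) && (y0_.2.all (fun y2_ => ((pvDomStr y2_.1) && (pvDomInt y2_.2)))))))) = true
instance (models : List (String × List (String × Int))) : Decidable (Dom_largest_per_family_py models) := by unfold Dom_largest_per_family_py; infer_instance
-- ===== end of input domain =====

-- B groups models by family and picks each group's winner with max (first maximal element),
-- instead of A's incremental running-best dict; alternative decomposition, same cost.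


-- ===== PORT A =====
-- keys of FAMILY_COLORS, in insertion order (only the keys matter to _family)
def pvFamKeys : List String := ["pythia", "gpt2", "opt", "qwen", "gemma", "mistral", "phi"]

-- the 'for fam in FAMILY_COLORS: if fam in mid.lower(): return fam' loop of _family
def pvFamLoop (fams : List String) (low : String) : String :=
  match fams with
  | [] => "other"
  | f :: rest => if PySem.Str.isIn f low then f else pvFamLoop rest low

def pvFamily (mid : String) : String := pvFamLoop pvFamKeys (PySem.Str.lower mid)

-- mdata.get("hidden_dim", 0) / mdata.get("n_layers", 0)
def pvDim (md : List (String × Int)) : Int := PySem.Dict.getD ⟨md⟩ "hidden_dim" 0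
def pvLay (md : List (String × Int)) : Int := PySem.Dict.getD ⟨md⟩ "n_layers" 0

-- Python tuple comparison 'score > best[fam][1]' on (dim, n) pairs (lexicographic)
def pvScoreGt (a b : Int × Int) : Bool := a.1 > b.1 || (a.1 == b.1 && a.2 > b.2)

def largest_per_family_py (models : List (String × List (String × Int))) : List (String × List (String × Int)) :=
  let best : PySem.Dict String (String × (Int × Int)) :=
    models.foldl (fun best p =>
      let fam := pvFamily p.1
      let score := (pvDim p.2, pvLay p.2)
      -- 'if fam not in best or score > best[fam][1]' (best[fam] only read when fam is present)
      if !best.contains fam || pvScoreGt score (best.getD fam ("", (0, 0))).2 then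
        best.insert fam (p.1, score)
      else best) PySem.Dict.empty
  let keep : PySem.Set String := PySem.Set.ofList (best.values.map (·.1))
  models.filter (fun p => PySem.Set.contains keep p.1)

-- ===== PORT B =====
-- _size(kv) = (kv[1].get("hidden_dim",0), kv[1].get("n_layers",0)); used as the max key
def largest_per_family_py_alt (models : List (String × List (String × Int))) : List (String × List (String × Int)) :=
  let groups : PySem.Dict String (List (String × List (String × Int))) :=
    models.foldl (fun g p => g.modify (pvFamily p.1) [] (· ++ [p])) PySem.Dict.empty
  -- {max(lst, key=_size)[0] for lst in groups.values()}; every lst is nonempty so max2? is some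
  let keep : PySem.Set String :=
    PySem.Set.ofList (groups.values.filterMap
      (fun lst => (PySem.List.max2? lst (fun kv => pvDim kv.2) (fun kv => pvLay kv.2)).map (·.1)))
  models.filter (fun p => PySem.Set.contains keep p.1)

-- ===== PRECONDITION & SPEC =====
def Spec_largest_per_family_py (models : List (String × List (String × Int))) (out : List (String × List (String × Int))) : Prop := out = largest_per_family_py_alt models
instance (models : List (String × List (String × Int))) (out : List (String × List (String × Int))) : Decidable (Spec_largest_per_family_py models out) := by unfold Spec_largest_per_family_py; infer_instance

-- ===== CLAIM (what is proved, stated in full; the proofs are below) =====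
def Claim_equal_largest_per_family_py : Prop := ∀ (models : List (String × List (String × Int))), Dom_largest_per_family_py models → Spec_largest_per_family_py models (largest_per_family_py models)

-- ===== LEMMAS AND PROOFS =====
-- abbreviation for a model entry
abbrev PvM := String × List (String × Int)

def pvScore (p : PvM) : Int × Int := (pvDim p.2, pvLay p.2)

-- one step of A's winner fold (first strictly-greater wins)
def pvFoldA (cur : String × (Int × Int)) (p : PvM) : String × (Int × Int) :=
  if pvScoreGt (pvScore p) cur.2 then (p.1, pvScore p) else cur

-- A's winner of one family's group, as a fold
def pvBestOf (lst : List PvM) : String × (Int × Int) :=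
  match lst with
  | [] => ("", (0, 0))
  | x :: rest => rest.foldl pvFoldA (x.1, pvScore x)

def pvGmap (e : String × List PvM) : String × (String × (Int × Int)) := (e.1, pvBestOf e.2)

def pvStepA (best : PySem.Dict String (String × (Int × Int))) (p : PvM) : PySem.Dict String (String × (Int × Int)) :=
  let fam := pvFamily p.1
  let score := (pvDim p.2, pvLay p.2)
  if !best.contains fam || pvScoreGt score (best.getD fam ("", (0, 0))).2 then
    best.insert fam (p.1, score)
  else best

def pvStepB (g : PySem.Dict String (List PvM)) (p : PvM) : PySem.Dict String (List PvM) :=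
  g.modify (pvFamily p.1) [] (· ++ [p])

theorem pvContains_map {g : List (String × List PvM)} (k : String) :
    PySem.Dict.contains (⟨g.map pvGmap⟩ : PySem.Dict String (String × (Int × Int))) k
      = PySem.Dict.contains (⟨g⟩ : PySem.Dict String (List PvM)) k := by
  simp [PySem.Dict.contains, List.any_map, Function.comp_def, pvGmap]

theorem pvGet?_map {g : List (String × List PvM)} (k : String) :
    PySem.Dict.get? (⟨g.map pvGmap⟩ : PySem.Dict String (String × (Int × Int))) k
      = (PySem.Dict.get? (⟨g⟩ : PySem.Dict String (List PvM)) k).map pvBestOf := by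
  induction g with
  | nil => rfl
  | cons e rest ih =>
    simp only [PySem.Dict.get?, PySem.Dict.items, List.map_cons, List.find?] at *
    by_cases h : e.1 == k
    · simp [pvGmap, h]
    · simp only [pvGmap] at *
      simp [h] at *
      exact ih

theorem pvGet?_mem {g : List (String × List PvM)} {k : String} {v : List PvM}
    (h : PySem.Dict.get? (⟨g⟩ : PySem.Dict String (List PvM)) k = some v) :
    (k, v) ∈ g := by
  simp only [PySem.Dict.get?, PySem.Dict.items, Option.map_eq_some_iff] at h
  obtain ⟨e, he, hv⟩ := h
  have hm := List.mem_of_find?_eq_some he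
  have hk := List.find?_some he
  have : e.1 = k := by simpa using hk
  cases e; cases this; cases hv; simpa using hm

theorem pvBestOf_append (lst : List PvM) (p : PvM) (h : lst ≠ []) :
    pvBestOf (lst ++ [p]) =
      if pvScoreGt (pvScore p) (pvBestOf lst).2 then (p.1, pvScore p) else pvBestOf lst := by
  cases lst with
  | nil => exact absurd rfl h
  | cons x rest => simp [pvBestOf, List.foldl_append, pvFoldA]

-- one step of the two loops preserves the items relation
theorem pvStep_rel (g : PySem.Dict String (List PvM)) (p : PvM)
    (hnd : g.keys.Nodup) (hne : ∀ e ∈ g.items, e.2 ≠ []) :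
    pvStepA ⟨g.items.map pvGmap⟩ p = ⟨(pvStepB g p).items.map pvGmap⟩ := by
  obtain ⟨l⟩ := g
  have hstepB : pvStepB ⟨l⟩ p
      = PySem.Dict.insert ⟨l⟩ (pvFamily p.1) (PySem.Dict.getD (⟨l⟩ : PySem.Dict String (List PvM)) (pvFamily p.1) [] ++ [p]) := rfl
  by_cases hc : PySem.Dict.contains (⟨l⟩ : PySem.Dict String (List PvM)) (pvFamily p.1) = true
  · -- family already present: unique entry (fam, lst)
    have hsome : (PySem.Dict.get? (⟨l⟩ : PySem.Dict String (List PvM)) (pvFamily p.1)).isSome := by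
      rw [← PySem.Dict.contains_eq_isSome_get?]; exact hc
    obtain ⟨lst, hlst⟩ := Option.isSome_iff_exists.mp hsome
    have hmem : (pvFamily p.1, lst) ∈ l := pvGet?_mem hlst
    have hlstne : lst ≠ [] := hne _ hmem
    have hgetA : PySem.Dict.getD (⟨l.map pvGmap⟩ : PySem.Dict String (String × (Int × Int))) (pvFamily p.1) ("", (0,0)) = pvBestOf lst := by
      simp [PySem.Dict.getD, pvGet?_map, hlst]
    have hgetB : PySem.Dict.getD (⟨l⟩ : PySem.Dict String (List PvM)) (pvFamily p.1) [] = lst := by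
      simp [PySem.Dict.getD, hlst]
    have hcontA : PySem.Dict.contains (⟨l.map pvGmap⟩ : PySem.Dict String (String × (Int × Int))) (pvFamily p.1) = true := by
      rw [pvContains_map]; exact hc
    rw [hstepB, hgetB]
    by_cases hgt : pvScoreGt (pvDim p.2, pvLay p.2) (pvBestOf lst).2 = true
    · -- strictly larger: both sides overwrite the family's entry
      have hA : pvStepA ⟨l.map pvGmap⟩ p
          = PySem.Dict.insert ⟨l.map pvGmap⟩ (pvFamily p.1) (p.1, (pvDim p.2, pvLay p.2)) := by
        unfold pvStepA
        rw [if_pos (by simp [hcontA, hgetA, hgt])]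
      rw [hA]
      apply PySem.Dict.ext
      rw [PySem.Dict.items_insert_of_contains _ _ hcontA, PySem.Dict.items_insert_of_contains _ _ hc]
      simp only [PySem.Dict.items, List.map_map]
      apply List.map_congr_left
      intro e _
      by_cases heq : (e.1 == pvFamily p.1) = true
      · simp [Function.comp, pvGmap, heq, pvBestOf_append lst p hlstne, hgt, pvScore]
      · simp [Function.comp, pvGmap, heq]
    · -- not larger: A keeps best unchanged, B's appended group has the same winner
      have hA : pvStepA ⟨l.map pvGmap⟩ p = ⟨l.map pvGmap⟩ := by
        unfold pvStepA
        rw [if_neg (by simp [hcontA, hgetA, hgt])]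
      rw [hA]
      apply PySem.Dict.ext
      rw [PySem.Dict.items_insert_of_contains _ _ hc]
      simp only [PySem.Dict.items]
      apply Eq.symm
      rw [← List.comp_map]
      apply List.map_congr_left
      intro e hel
      by_cases heq : (e.1 == pvFamily p.1) = true
      · have he1 : e.1 = pvFamily p.1 := by simpa using heq
        -- nodup keys: e is THE entry for this family, so e.2 = lst
        have hkey : e = (pvFamily p.1, lst) := by
          have hnd' : (l.map Prod.fst).Nodup := by simpa [PySem.Dict.keys, PySem.Dict.items] using hnd
          exact List.inj_on_of_nodup_map hnd' hel hmem (by simpa using heq)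
        rw [hkey]
        simp [Function.comp, pvGmap, pvBestOf_append lst p hlstne, hgt, pvScore]
      · simp [Function.comp, pvGmap, heq]
  · -- new family: both sides append
    have hc' : PySem.Dict.contains (⟨l⟩ : PySem.Dict String (List PvM)) (pvFamily p.1) = false :=
      Bool.eq_false_iff.mpr hc
    have hgetB : PySem.Dict.getD (⟨l⟩ : PySem.Dict String (List PvM)) (pvFamily p.1) [] = [] := by
      simp only [PySem.Dict.getD]
      rw [(PySem.Dict.get?_eq_none_iff_contains _ _).mpr hc']
      rfl
    have hcontA : PySem.Dict.contains (⟨l.map pvGmap⟩ : PySem.Dict String (String × (Int × Int))) (pvFamily p.1) = false := by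
      rw [pvContains_map]; exact hc'
    have hA : pvStepA ⟨l.map pvGmap⟩ p
        = PySem.Dict.insert ⟨l.map pvGmap⟩ (pvFamily p.1) (p.1, (pvDim p.2, pvLay p.2)) := by
      unfold pvStepA
      rw [if_pos (by simp [hcontA])]
    rw [hA, hstepB, hgetB]
    apply PySem.Dict.ext
    rw [PySem.Dict.items_insert_of_not_contains _ _ hcontA, PySem.Dict.items_insert_of_not_contains _ _ hc']
    simp [PySem.Dict.items, pvGmap, pvBestOf, pvScore]

theorem pvLoop_rel (models : List PvM) (g : PySem.Dict String (List PvM))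
    (hnd : g.keys.Nodup) (hne : ∀ e ∈ g.items, e.2 ≠ []) :
    models.foldl pvStepA ⟨g.items.map pvGmap⟩ = ⟨(models.foldl pvStepB g).items.map pvGmap⟩ := by
  induction models generalizing g with
  | nil => rfl
  | cons p rest ih =>
    simp only [List.foldl_cons]
    rw [pvStep_rel g p hnd hne]
    apply ih
    · exact PySem.Dict.nodup_keys_insert _ _ _ hnd
    · intro e he
      rw [show pvStepB g p = g.insert (pvFamily p.1) (g.getD (pvFamily p.1) [] ++ [p]) from rfl] at he
      rcases (PySem.Dict.mem_items_insert _ _ _ _).mp he with h | ⟨h, _⟩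
      · subst h; simp
      · exact hne _ h

-- B's replacement test in max equals A's strict-greater test
theorem pvCond_eq (m y : PvM) :
    (decide (pvDim m.2 < pvDim y.2) || !decide (pvDim y.2 < pvDim m.2) && decide (pvLay m.2 < pvLay y.2))
      = pvScoreGt (pvScore y) (pvScore m) := by
  apply Bool.eq_iff_iff.mpr
  simp [pvScoreGt, pvScore, gt_iff_lt]
  omega

-- invariant of the two winner folds: B's max over (m :: t) tracks A's fold from (m.1, score m)
theorem pvMaxFold_inv (t : List PvM) : ∀ m : PvM,
    (PySem.List.max2? (m :: t) (fun kv => pvDim kv.2) (fun kv => pvLay kv.2)).map (fun x => x.1)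
      = some ((t.foldl pvFoldA (m.1, pvScore m)).1) := by
  induction t with
  | nil => intro m; rfl
  | cons y t ih =>
    intro m
    have ihy := ih y
    have ihm := ih m
    simp only [PySem.List.max2?, List.foldl_cons] at ihy ihm ⊢
    rw [pvCond_eq]
    rw [show pvFoldA (m.1, pvScore m) y
        = if pvScoreGt (pvScore y) (pvScore m) = true then (y.1, pvScore y) else (m.1, pvScore m) from rfl]
    by_cases hgt : pvScoreGt (pvScore y) (pvScore m) = true
    · rw [if_pos hgt, if_pos hgt]; exact ihy
    · rw [if_neg hgt, if_neg hgt]; exact ihm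

-- B's per-group max equals A's winner fold, for nonempty groups
theorem pvMax2?_eq_bestOf (lst : List PvM) (h : lst ≠ []) :
    (PySem.List.max2? lst (fun kv => pvDim kv.2) (fun kv => pvLay kv.2)).map (fun x => x.1)
      = some (pvBestOf lst).1 := by
  cases lst with
  | nil => exact absurd rfl h
  | cons x rest => exact pvMaxFold_inv rest x

-- all groups built by the B loop are nonempty
theorem pvStepB_ne (models : List PvM) (g : PySem.Dict String (List PvM))
    (hg : ∀ e ∈ g.items, e.2 ≠ []) : ∀ e ∈ (models.foldl pvStepB g).items, e.2 ≠ [] := by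
  induction models generalizing g with
  | nil => exact hg
  | cons p rest ih =>
    apply ih
    intro e he
    rw [show pvStepB g p = g.insert (pvFamily p.1) (g.getD (pvFamily p.1) [] ++ [p]) from rfl] at he
    rcases (PySem.Dict.mem_items_insert _ _ _ _).mp he with h | ⟨h, _⟩
    · subst h; simp
    · exact hg _ h

-- the two keep lists coincide
theorem pvKeepList_eq (l : List (String × List PvM)) (hne : ∀ e ∈ l, e.2 ≠ []) :
    (PySem.Dict.values (⟨l.map pvGmap⟩ : PySem.Dict String (String × (Int × Int)))).map (fun x => x.1)
      = (PySem.Dict.values (⟨l⟩ : PySem.Dict String (List PvM))).filterMap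
        (fun lst => (PySem.List.max2? lst (fun kv => pvDim kv.2) (fun kv => pvLay kv.2)).map (fun x => x.1)) := by
  induction l with
  | nil => rfl
  | cons e rest ih =>
    simp only [PySem.Dict.values, PySem.Dict.items, List.map_cons, List.filterMap_cons]
    rw [pvMax2?_eq_bestOf e.2 (hne e (by simp))]
    have := ih (fun x hx => hne x (by simp [hx]))
    simp only [PySem.Dict.values, PySem.Dict.items] at this
    rw [this]
    rfl

-- ===== VERDICT (by name: the statement is the Claim_ definition above) =====
theorem largest_per_family_py_spec : Claim_equal_largest_per_family_py := by
  intro models _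
  show largest_per_family_py models = largest_per_family_py_alt models
  have hne : ∀ e ∈ (models.foldl pvStepB PySem.Dict.empty).items, e.2 ≠ [] :=
    pvStepB_ne models PySem.Dict.empty (by simp [PySem.Dict.empty])
  have hkeep : ((models.foldl pvStepA ⟨PySem.Dict.empty.items.map pvGmap⟩).values).map (fun x => x.1)
      = ((models.foldl pvStepB PySem.Dict.empty).values).filterMap
        (fun lst => (PySem.List.max2? lst (fun kv => pvDim kv.2) (fun kv => pvLay kv.2)).map (fun x => x.1)) := by
    rw [pvLoop_rel models PySem.Dict.empty (by simp [PySem.Dict.keys, PySem.Dict.empty]) (by simp [PySem.Dict.empty])]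
    exact pvKeepList_eq (models.foldl pvStepB PySem.Dict.empty).items hne
  show models.filter (fun p => PySem.Set.contains (PySem.Set.ofList
        (((models.foldl pvStepA ⟨PySem.Dict.empty.items.map pvGmap⟩).values).map (fun x => x.1))) p.1)
    = models.filter (fun p => PySem.Set.contains (PySem.Set.ofList
        (((models.foldl pvStepB PySem.Dict.empty).values).filterMap
          (fun lst => (PySem.List.max2? lst (fun kv => pvDim kv.2) (fun kv => pvLay kv.2)).map (fun x => x.1)))) p.1)
  rw [hkeep]
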